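-- pv_equiv track=rewrite | github.com/acgs/PDHS | PDHS/pdhs.py | pointwise_dominantes
-- ===== SOURCE A (Python) =====
-- def pointwise_dominantes(alpha_vector1: list, alpha_vector2: list):
--     """Test if `alpha_vector1` pointwise dominates `alpha_vector2`.
--
--     Note:
--         We assume that `alpha_vector1` does not dominate `alpha_vector2` if they are identical.
--     Args:
--         alpha_vector1 (list[float]): an alpha-vector of a ValueFunction to test if dominates.
--         alpha_vector2 (list[float]): an alpha-vector of a ValueFunction to test if dominated.
--     Returns:
--         True if `alpha_vector1` pointwise dominates `alpha_vector2`.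
--     """
--     assert(len(alpha_vector1) == len(alpha_vector2))
--     if alpha_vector1 == alpha_vector2:
--         return False
--     for a1, a2 in zip(alpha_vector1, alpha_vector2):
--         if a2 > a1:
--             return False
--     return True
-- ===== SOURCE B (Python) =====
-- def pointwise_dominantes(alpha_vector1: list, alpha_vector2: list):
--     """Extrema of the difference vector: v1 dominates v2 iff the componentwise
--     differences are nonempty, their minimum is >= 0 and their maximum is > 0."""
--     assert(len(alpha_vector1) == len(alpha_vector2))
--     diffs = [a1 - a2 for a1, a2 in zip(alpha_vector1, alpha_vector2)]
--     return bool(diffs) and min(diffs) >= 0 and max(diffs) > 0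
-- ===== Notes on version B (the rewrite author's own statement) =====
-- stated objective: alternative
-- what changed: Replaced A's whole-list equality check followed by an early-return scan with a reduction: build the componentwise difference vector and decide dominance from its min and max (nonempty, min >= 0, max > 0).
import Mathlib
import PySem

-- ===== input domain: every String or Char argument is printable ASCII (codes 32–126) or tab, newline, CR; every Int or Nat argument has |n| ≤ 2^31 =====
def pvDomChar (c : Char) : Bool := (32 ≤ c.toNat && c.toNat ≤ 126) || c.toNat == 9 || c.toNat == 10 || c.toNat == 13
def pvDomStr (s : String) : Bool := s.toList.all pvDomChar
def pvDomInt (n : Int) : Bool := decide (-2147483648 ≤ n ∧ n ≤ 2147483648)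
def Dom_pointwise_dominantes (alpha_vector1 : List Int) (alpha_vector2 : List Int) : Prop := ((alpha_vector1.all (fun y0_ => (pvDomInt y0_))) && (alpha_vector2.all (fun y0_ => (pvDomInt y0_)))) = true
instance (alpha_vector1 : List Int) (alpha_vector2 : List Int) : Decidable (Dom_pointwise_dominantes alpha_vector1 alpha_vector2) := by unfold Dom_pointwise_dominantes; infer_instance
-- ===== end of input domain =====

-- B replaces A's equality check + early-return scan by a reduction over the difference vector (alternative decomposition, same cost).

-- ===== PORT A =====
-- A's for-loop over zip(v1, v2) with early return on a2 > a1
def pointwise_dominantes_loopA : List (Int × Int) → Bool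
  | [] => true
  | (a1, a2) :: rest => if a2 > a1 then false else pointwise_dominantes_loopA rest

def pointwise_dominantes (alpha_vector1 : List Int) (alpha_vector2 : List Int) : Bool :=
  if alpha_vector1 = alpha_vector2 then false
  else pointwise_dominantes_loopA (alpha_vector1.zip alpha_vector2)

-- ===== PORT B =====
-- B: diffs = [a1 - a2 for …]; return bool(diffs) and min(diffs) >= 0 and max(diffs) > 0
-- (Python's `and` short-circuits, so min/max are only taken on a nonempty list: the matches.)
def pointwise_dominantes_alt (alpha_vector1 : List Int) (alpha_vector2 : List Int) : Bool :=
  let diffs := (alpha_vector1.zip alpha_vector2).map (fun p => p.1 - p.2)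
  !diffs.isEmpty &&
    (match PySem.List.min? diffs (fun d => d) with
     | some m => decide (0 ≤ m)
     | none => false) &&
    (match PySem.List.max? diffs (fun d => d) with
     | some m => decide (0 < m)
     | none => false)

-- ===== PRECONDITION & SPEC =====
-- Both A and B raise AssertionError when the lengths differ; exactly those inputs are excluded.
def Pre_pointwise_dominantes (alpha_vector1 : List Int) (alpha_vector2 : List Int) : Prop :=
  alpha_vector1.length = alpha_vector2.length
instance (alpha_vector1 : List Int) (alpha_vector2 : List Int) : Decidable (Pre_pointwise_dominantes alpha_vector1 alpha_vector2) := by unfold Pre_pointwise_dominantes; infer_instance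

def pvWitness_pointwise_dominantes : List Int × List Int := ([3, 2], [1, 2])

def Spec_pointwise_dominantes (alpha_vector1 : List Int) (alpha_vector2 : List Int) (out : Bool) : Prop := out = pointwise_dominantes_alt alpha_vector1 alpha_vector2
instance (alpha_vector1 : List Int) (alpha_vector2 : List Int) (out : Bool) : Decidable (Spec_pointwise_dominantes alpha_vector1 alpha_vector2 out) := by unfold Spec_pointwise_dominantes; infer_instance

-- ===== CLAIM (what is proved, stated in full; the proofs are below) =====
def Claim_equal_pointwise_dominantes : Prop := ∀ (alpha_vector1 : List Int) (alpha_vector2 : List Int), Dom_pointwise_dominantes alpha_vector1 alpha_vector2 → Pre_pointwise_dominantes alpha_vector1 alpha_vector2 → Spec_pointwise_dominantes alpha_vector1 alpha_vector2 (pointwise_dominantes alpha_vector1 alpha_vector2)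

-- ===== LEMMAS AND PROOFS =====

-- A's loop is "all components satisfy a2 ≤ a1"
theorem loopA_eq_all (ps : List (Int × Int)) :
    pointwise_dominantes_loopA ps = ps.all (fun p => decide (p.2 ≤ p.1)) := by
  induction ps with
  | nil => rfl
  | cons p rest ih =>
    obtain ⟨a1, a2⟩ := p
    simp only [pointwise_dominantes_loopA, List.all_cons, ih]
    by_cases h : a2 > a1
    · simp [h, not_le.mpr h]
    · simp [h, not_lt.mp h]

-- "min of the diffs is ≥ 0" is "all diffs are ≥ 0"
theorem min?_nonneg_iff (ds : List Int) (m : Int)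
    (h : PySem.List.min? ds (fun d => d) = some m) :
    0 ≤ m ↔ ∀ d ∈ ds, 0 ≤ d := by
  constructor
  · intro hm d hd
    exact le_trans hm (PySem.List.min?_isMin h d hd)
  · intro hall
    exact hall m (PySem.List.min?_mem h)

-- "max of the diffs is > 0" is "some diff is > 0"
theorem max?_pos_iff (ds : List Int) (m : Int)
    (h : PySem.List.max? ds (fun d => d) = some m) :
    0 < m ↔ ∃ d ∈ ds, 0 < d := by
  constructor
  · intro hm
    exact ⟨m, PySem.List.max?_mem h, hm⟩
  · rintro ⟨d, hd, hpos⟩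
    exact lt_of_lt_of_le hpos (PySem.List.max?_isMax h d hd)

-- With equal lengths, list equality is componentwise equality over the zip
theorem eq_iff_zip_all_eq (v1 v2 : List Int) (h : v1.length = v2.length) :
    v1 = v2 ↔ ∀ p ∈ v1.zip v2, p.1 = p.2 := by
  induction v1 generalizing v2 with
  | nil =>
    cases v2 with
    | nil => simp
    | cons b u => simp at h
  | cons a t ih =>
    cases v2 with
    | nil => simp at h
    | cons b u =>
      simp only [List.length_cons, Nat.add_right_cancel_iff] at h
      simp [List.zip_cons_cons, ih u h]

-- ===== VERDICT (by name: the statement is the Claim_ definition above) =====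
theorem pointwise_dominantes_spec : Claim_equal_pointwise_dominantes := by
  intro v1 v2 _ hpre
  unfold Spec_pointwise_dominantes pointwise_dominantes pointwise_dominantes_alt
  rw [loopA_eq_all]
  set ps := v1.zip v2 with hps
  set ds := ps.map (fun p => p.1 - p.2) with hds
  by_cases hnil : ps = []
  · have hveq : v1 = v2 := (eq_iff_zip_all_eq v1 v2 hpre).mpr (by simp [← hps, hnil])
    simp [hveq, hnil, hds]
  · have hdne : ds ≠ [] := by simp [hds, hnil]
    obtain ⟨mn, hmn⟩ : ∃ m, PySem.List.min? ds (fun d => d) = some m := by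
      cases hd : ds with
      | nil => exact absurd hd hdne
      | cons x t => exact ⟨t.foldl min x, PySem.List.min?_id_cons x t⟩
    obtain ⟨mx, hmx⟩ : ∃ m, PySem.List.max? ds (fun d => d) = some m := by
      cases hd : ds with
      | nil => exact absurd hd hdne
      | cons x t => exact ⟨t.foldl max x, PySem.List.max?_id_cons x t⟩
    simp only [hmn, hmx]
    have hisEmpty : ds.isEmpty = false := by
      simpa using hdne
    by_cases hall : ∀ p ∈ ps, p.2 ≤ p.1
    · have hmin : (0:Int) ≤ mn := by
        rw [min?_nonneg_iff ds mn hmn]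
        intro d hd
        obtain ⟨p, hp, rfl⟩ := List.mem_map.mp (hds ▸ hd)
        have := hall p hp; omega
      by_cases hveq : v1 = v2
      · have hnostrict : ¬ (0 < mx) := by
          rw [max?_pos_iff ds mx hmx]
          rintro ⟨d, hd, hpos⟩
          obtain ⟨p, hp, rfl⟩ := List.mem_map.mp (hds ▸ hd)
          have := (eq_iff_zip_all_eq v1 v2 hpre).mp hveq p (hps ▸ hp)
          omega
        simp [hveq, hisEmpty, hmin, hnostrict]
      · have hstrict : (0:Int) < mx := by
          rw [max?_pos_iff ds mx hmx]
          have := (eq_iff_zip_all_eq v1 v2 hpre).not.mp hveq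
          push_neg at this
          obtain ⟨p, hp, hne⟩ := this
          have hle := hall p (hps ▸ hp)
          exact ⟨p.1 - p.2, List.mem_map.mpr ⟨p, hps ▸ hp, rfl⟩, by omega⟩
        have hallb : ps.all (fun p => decide (p.2 ≤ p.1)) = true := by
          simp only [List.all_eq_true]; intro p hp; simpa using hall p hp
        simp [hveq, hisEmpty, hmin, hstrict, hallb]
    · push_neg at hall
      obtain ⟨p, hp, hgt⟩ := hall
      have hveq : v1 ≠ v2 := by
        intro hc
        have := (eq_iff_zip_all_eq v1 v2 hpre).mp hc p (hps ▸ hp)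
        omega
      have hmin : ¬ ((0:Int) ≤ mn) := by
        rw [min?_nonneg_iff ds mn hmn]
        push_neg
        exact ⟨p.1 - p.2, List.mem_map.mpr ⟨p, hps ▸ hp, rfl⟩, by omega⟩
      have hallb : ps.all (fun p => decide (p.2 ≤ p.1)) = false := by
        simp only [List.all_eq_false]
        exact ⟨p, hp, by simpa using hgt⟩
      simp [hveq, hisEmpty, hmin, hallb]
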